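-- pv_equiv track=rewrite | github.com/kevinvlad03/BioInformatics | Labs/Project_L3/ex2.py | sw_tm
-- ===== SOURCE A (Python) =====
-- def sw_tm(dna_seq, window_size=8):
--     tm_val = []
--     for i in range(len(dna_seq) - window_size + 1):
--         win = dna_seq[i:i + window_size]
--         a_count = win.count('A')
--         t_count = win.count('T')
--         c_count = win.count('C')
--         g_count = win.count('G')
--         tm = 2 * (a_count + t_count) + 4 * (c_count + g_count)
--         tm_val.append((i, tm))
--     return tm_val
-- ===== SOURCE B (Python) =====
-- def sw_tm(dna_seq, window_size=8):
--     # Incremental sliding window: compute the first window's Tm once, then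
--     # update it in O(1) per shift by the weights of the entering/leaving base.
--     n = len(dna_seq)
--     if window_size < 0 or window_size > n:
--         return []
--
--     def wt(c):
--         if c in 'AT':
--             return 2
--         if c in 'CG':
--             return 4
--         return 0
--
--     tm = sum(wt(c) for c in dna_seq[:window_size])
--     out = [(0, tm)]
--     for i in range(1, n - window_size + 1):
--         tm += wt(dna_seq[i + window_size - 1]) - wt(dna_seq[i - 1])
--         out.append((i, tm))
--     return out
-- ===== Notes on version B (the rewrite author's own statement) =====
-- stated objective: faster
-- what changed: Replaces the per-window recount (four str.count scans of every w-length slice) by an incremental sliding window that computes the first window's Tm once and updates it in O(1) per shift with the weight of the entering and leaving base.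
-- outside the precondition, e.g. on sw_tm('ACG', -1): A returns [(0, 6), (1, 0), (2, 0), (3, 0), (4, 0)], B returns []
import Mathlib
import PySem

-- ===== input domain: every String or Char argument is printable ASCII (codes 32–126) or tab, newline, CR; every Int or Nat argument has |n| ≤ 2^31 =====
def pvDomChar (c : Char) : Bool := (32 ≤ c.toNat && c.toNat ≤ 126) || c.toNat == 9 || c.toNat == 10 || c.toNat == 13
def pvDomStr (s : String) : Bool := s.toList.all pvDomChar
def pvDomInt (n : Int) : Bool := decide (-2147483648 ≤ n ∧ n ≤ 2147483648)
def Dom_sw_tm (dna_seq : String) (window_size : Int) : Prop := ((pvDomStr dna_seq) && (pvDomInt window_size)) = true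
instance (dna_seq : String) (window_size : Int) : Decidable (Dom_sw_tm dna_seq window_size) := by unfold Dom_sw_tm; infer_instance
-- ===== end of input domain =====

-- B replaces A's per-window recount (four counts over every slice) by an incremental
-- sliding window updated in O(1) per shift; measured objective: faster (asymptotic).


-- ===== PORT A =====
def sw_tm (dna_seq : String) (window_size : Int) : List (Int × Int) :=
  (PySem.List.pyRange 0 (PySem.Str.len dna_seq - window_size + 1) 1).foldl
    (fun tm_val i =>
      let win := PySem.Str.slice dna_seq (some i) (some (i + window_size))
      let a_count : Int := PySem.Str.count win "A"
      let t_count : Int := PySem.Str.count win "T"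
      let c_count : Int := PySem.Str.count win "C"
      let g_count : Int := PySem.Str.count win "G"
      tm_val ++ [(i, 2 * (a_count + t_count) + 4 * (c_count + g_count))])
    []

-- ===== PORT B =====
-- weight of one base ('c in "AT"' on a single char is the equality test below; exact)
def pvWt (c : Char) : Int :=
  if c = 'A' ∨ c = 'T' then 2 else if c = 'C' ∨ c = 'G' then 4 else 0

-- one iteration of Source B's loop body over the state (out, tm)
def pvStep (s : List Char) (w : Int) (st : List (Int × Int) × Int) (i : Int) :
    List (Int × Int) × Int :=
  let tm := st.2 + pvWt (PySem.List.pyGetD s (i + w - 1) ' ') - pvWt (PySem.List.pyGetD s (i - 1) ' ')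
  (st.1 ++ [(i, tm)], tm)

def sw_tm_alt (dna_seq : String) (window_size : Int) : List (Int × Int) :=
  let s := dna_seq.toList
  let n : Int := (s.length : Int)
  if window_size < 0 ∨ n < window_size then []
  else
    let tm0 : Int := ((PySem.List.slice s none (some window_size)).map pvWt).sum
    ((PySem.List.pyRange 1 (n - window_size + 1) 1).foldl (pvStep s window_size)
      ([(0, tm0)], tm0)).1

-- ===== PRECONDITION & SPEC =====
-- Pre_ excludes negative window_size: outside the function's natural domain, where A's
-- values are an accident of Python's negative-end slicing (B returns the empty list there).
def Pre_sw_tm (_dna_seq : String) (window_size : Int) : Prop := 0 ≤ window_size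
instance (dna_seq : String) (window_size : Int) : Decidable (Pre_sw_tm dna_seq window_size) := by
  unfold Pre_sw_tm; infer_instance
def pvWitness_sw_tm : String × Int := ("ACGTTA", 3)
def Spec_sw_tm (dna_seq : String) (window_size : Int) (out : List (Int × Int)) : Prop := out = sw_tm_alt dna_seq window_size
instance (dna_seq : String) (window_size : Int) (out : List (Int × Int)) : Decidable (Spec_sw_tm dna_seq window_size out) := by unfold Spec_sw_tm; infer_instance

-- ===== CLAIM (what is proved, stated in full; the proofs are below) =====
def Claim_equal_sw_tm : Prop := ∀ (dna_seq : String) (window_size : Int), Dom_sw_tm dna_seq window_size → Pre_sw_tm dna_seq window_size → Spec_sw_tm dna_seq window_size (sw_tm dna_seq window_size)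

-- ===== LEMMAS AND PROOFS =====

-- window Tm as the sum of base weights
def pvW (cs : List Char) : Int := (cs.map pvWt).sum

lemma count_go_singleton (c : Char) :
    ∀ (fuel : Nat) (l : List Char) (acc : Nat), l.length ≤ fuel →
      PySem.Chars.count.go [c] fuel l acc = acc + l.count c := by
  intro fuel
  induction fuel with
  | zero => intro l acc h; cases l with
    | nil => simp [PySem.Chars.count.go]
    | cons x t => simp at h
  | succ n ih =>
    intro l acc h
    cases l with
    | nil => simp [PySem.Chars.count.go]
    | cons x t =>
      simp only [PySem.Chars.count.go]
      have hpre : [c].isPrefixOf (x :: t) = (c == x) := by simp [List.isPrefixOf]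
      rw [hpre]
      by_cases hx : c = x
      · subst hx
        simp only [beq_self_eq_true, if_true, List.length_cons, List.length_nil,
          List.drop_succ_cons, List.drop_zero]
        rw [ih t (acc+1) (by simpa using h)]
        simp
        omega
      · simp only [beq_iff_eq, if_neg hx]
        rw [ih t acc (by simpa using h)]
        simp [Ne.symm hx]
lemma count_singleton (cs : List Char) (c : Char) :
    PySem.Chars.count cs [c] = cs.count c := by
  simp [PySem.Chars.count, count_go_singleton c cs.length cs 0 le_rfl]

lemma tm_formula (cs : List Char) :
    2 * ((cs.count 'A' : Int) + cs.count 'T') + 4 * ((cs.count 'C' : Int) + cs.count 'G')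
      = pvW cs := by
  induction cs with
  | nil => simp [pvW]
  | cons x t ih =>
    simp only [pvW, List.map_cons, List.sum_cons, List.count_cons] at *
    by_cases h1 : x = 'A' <;> by_cases h2 : x = 'T' <;> by_cases h3 : x = 'C' <;>
      by_cases h4 : x = 'G' <;> simp_all [pvWt] <;> omega

lemma slide (s : List Char) (w i : Nat) (h : i + w < s.length) :
    pvW ((s.drop (i+1)).take w)
      = pvW ((s.drop i).take w) + pvWt (s.getD (i+w) ' ') - pvWt (s.getD i ' ') := by
  have hi : i < s.length := by omega
  have h1 : (s.drop i).take (w+1) = (s.drop i).take w ++ [s[i+w]] := by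
    rw [List.take_add_one]
    congr 1
    rw [List.getElem?_drop]
    simp [List.getElem?_eq_getElem (by omega : i + w < s.length)]
  have h2 : s.drop i = s[i] :: s.drop (i+1) := List.drop_eq_getElem_cons hi
  have h3 : (s.drop i).take (w+1) = s[i] :: (s.drop (i+1)).take w := by
    rw [h2]; rfl
  have h4 := congrArg pvW (h1.symm.trans h3)
  simp only [pvW, List.map_append, List.map_cons, List.sum_append, List.sum_cons,
    List.map_nil, List.sum_nil] at h4
  rw [List.getD_eq_getElem s ' ' (by omega : i + w < s.length),
      List.getD_eq_getElem s ' ' hi]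
  simp only [pvW]
  omega
lemma loopB (s : List Char) (w b : Nat) (hb : b + w = s.length) :
    ∀ (k a : Nat), a + k = b + 1 → 1 ≤ a → ∀ (acc : List (Int × Int)),
      ((PySem.List.pyRange (a : Int) ((b : Int) + 1) 1).foldl (pvStep s (w : Int))
          (acc, pvW ((s.drop (a-1)).take w))).1
        = acc ++ (List.range k).map (fun j => (((a + j : Nat) : Int), pvW ((s.drop (a+j)).take w))) := by
  intro k
  induction k with
  | zero =>
    intro a ha h1 acc
    rw [PySem.List.pyRange_one_eq_nil (by omega : (b:Int) + 1 ≤ (a:Int))]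
    simp
  | succ k ih =>
    intro a ha h1 acc
    rw [PySem.List.pyRange_one_cons (by omega : (a:Int) < (b:Int) + 1)]
    rw [List.foldl_cons]
    have hidx1 : (a : Int) + (w : Int) - 1 = ((a + w - 1 : Nat) : Int) := by omega
    have hidx2 : (a : Int) - 1 = ((a - 1 : Nat) : Int) := by omega
    have hlt1 : a + w - 1 < s.length := by omega
    have hlt2 : a - 1 < s.length := by omega
    have hsl := slide s w (a-1) (by omega)
    rw [show a - 1 + 1 = a from by omega, show a - 1 + w = a + w - 1 from by omega] at hsl
    have hstep : pvStep s (w : Int) (acc, pvW ((s.drop (a-1)).take w)) (a : Int)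
        = (acc ++ [((a : Int), pvW ((s.drop a).take w))], pvW ((s.drop a).take w)) := by
      simp only [pvStep, hidx1, hidx2, PySem.List.pyGetD_natCast]
      rw [hsl]
    rw [hstep, show ((a:Int) + 1) = ((a + 1 : Nat) : Int) from by omega]
    have hih := ih (a+1) (by omega) (by omega) (acc ++ [((a : Int), pvW ((s.drop a).take w))])
    rw [show a + 1 - 1 = a from rfl] at hih
    rw [hih, List.range_succ_eq_map, List.map_cons, List.map_map]
    simp only [List.append_assoc, List.singleton_append]
    congr 1
    refine List.cons_eq_cons.mpr ⟨by norm_num, ?_⟩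
    refine List.map_congr_left fun j hj => ?_
    simp only [Function.comp]
    rw [show a + (j + 1) = a + 1 + j from by omega]

lemma hA_lemma (dna : String) (w' : Nat) (hwn : w' ≤ dna.toList.length) :
    sw_tm dna (w' : Int)
      = (List.range (dna.toList.length - w' + 1)).map
          (fun (k : Nat) => ((k : Int), pvW ((dna.toList.drop k).take w'))) := by
  simp only [sw_tm, PySem.List.foldl_append_singleton_eq_map, List.nil_append]
  rw [show PySem.Str.len dna - (w' : Int) + 1
        = (((dna.toList.length - w' + 1 : Nat) : Int)) from by
      simp only [PySem.Str.len_eq]; push_cast [Nat.cast_sub hwn]; ring,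
    PySem.List.pyRange_zero_nat, List.map_map]
  refine List.map_congr_left fun k hk => ?_
  simp only [Function.comp_apply]
  have hct : ∀ c : Char,
      PySem.Chars.count
        (PySem.Str.slice dna (some (k : Int)) (some ((k : Int) + (w' : Int)))).toList [c]
      = ((dna.toList.drop k).take w').count c := by
    intro c
    rw [PySem.Str.toList_slice, PySem.Chars.slice_eq_listSlice,
      PySem.List.slice_natCast_add, count_singleton]
  simp only [PySem.Str.count_eq, show ("A" : String).toList = ['A'] from rfl,
    show ("T" : String).toList = ['T'] from rfl, show ("C" : String).toList = ['C'] from rfl,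
    show ("G" : String).toList = ['G'] from rfl, hct]
  exact Prod.ext rfl (tm_formula _)

lemma hB_lemma (dna : String) (w' : Nat) (hwn : w' ≤ dna.toList.length) :
    sw_tm_alt dna (w' : Int)
      = ((0 : Int), pvW (dna.toList.take w'))
          :: (List.range (dna.toList.length - w')).map
              (fun (j : Nat) => (((1 + j : Nat) : Int), pvW ((dna.toList.drop (1 + j)).take w'))) := by
  simp only [sw_tm_alt]
  rw [if_neg (by
    simp only [not_or, not_lt]
    exact ⟨Int.natCast_nonneg w', by exact_mod_cast hwn⟩)]
  rw [PySem.List.slice_to_natCast,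
    show ((dna.toList.take w').map pvWt).sum = pvW (dna.toList.take w') from rfl,
    show ((dna.toList.length : Int)) - (w' : Int) + 1
        = ((dna.toList.length - w' : Nat) : Int) + 1 from by
      push_cast [Nat.cast_sub hwn]; ring]
  have hL := loopB dna.toList w' (dna.toList.length - w') (by omega)
      (dna.toList.length - w') 1 (by omega) (by omega)
      [((0 : Int), pvW (dna.toList.take w'))]
  rw [show (1 : Nat) - 1 = 0 from rfl, List.drop_zero, Nat.cast_one] at hL
  rw [hL]
  simp only [List.singleton_append]

-- ===== VERDICT (by name: the statement is the Claim_ definition above) =====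
theorem sw_tm_spec : Claim_equal_sw_tm := by
  intro dna w hdom hpre
  show sw_tm dna w = sw_tm_alt dna w
  by_cases hbig : (dna.toList.length : Int) < w
  · simp only [sw_tm, sw_tm_alt]
    rw [PySem.List.pyRange_one_eq_nil (by simp only [PySem.Str.len_eq]; omega),
        if_pos (Or.inr hbig)]
    simp
  · push Not at hbig
    obtain ⟨w', rfl⟩ : ∃ w' : Nat, w = (w' : Int) := ⟨w.toNat, (Int.toNat_of_nonneg hpre).symm⟩
    have hwn : w' ≤ dna.toList.length := by exact_mod_cast hbig
    rw [hA_lemma dna w' hwn, hB_lemma dna w' hwn]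
    rw [show dna.toList.length - w' + 1 = (dna.toList.length - w') + 1 from rfl,
      List.range_succ_eq_map, List.map_cons, List.map_map]
    refine List.cons_eq_cons.mpr ⟨by norm_num, ?_⟩
    refine List.map_congr_left fun j hj => ?_
    simp only [Function.comp]
    rw [show j.succ = 1 + j from by omega]
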